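-- pv_equiv track=rewrite | github.com/incnone/AdventOfCode | 2016/day2.py | part_1
-- ===== SOURCE A (Python) =====
-- class KeypadLoc(object):
--     def __init__(self):
--         self.loc = [0, 0]
--
--     def move(self, ltr):
--         if ltr == 'U':
--             self.loc[1] = max(-1, self.loc[1] - 1)
--         elif ltr == 'D':
--             self.loc[1] = min(1, self.loc[1] + 1)
--         elif ltr == 'L':
--             self.loc[0] = max(-1, self.loc[0] - 1)
--         elif ltr == 'R':
--             self.loc[0] = min(1, self.loc[0] + 1)
--
--     def digit(self):
--         return str(3*(self.loc[1]+1) + self.loc[0]+2)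
--
-- def part_1(dirs):
--     keypad_loc = KeypadLoc()
--     code = ''
--     for dirline in dirs.splitlines(keepends=False):
--         for c in dirline:
--             keypad_loc.move(c)
--         code += keypad_loc.digit()
--     return code
-- ===== SOURCE B (Python) =====
-- def part_1(dirs):
--     # Build a transition table from the keypad layout once; then each move is a table lookup.
--     pad = ['123', '456', '789']
--     trans = {}
--     for r in range(3):
--         for c in range(3):
--             k = pad[r][c]
--             if r > 0:
--                 trans[('U', k)] = pad[r - 1][c]
--             if r < 2:
--                 trans[('D', k)] = pad[r + 1][c]
--             if c > 0:
--                 trans[('L', k)] = pad[r][c - 1]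
--             if c < 2:
--                 trans[('R', k)] = pad[r][c + 1]
--     key = '5'
--     code = ''
--     for line in dirs.splitlines():
--         for ch in line:
--             key = trans.get((ch, key), key)
--         code += key
--     return code
-- ===== Notes on version B (the rewrite author's own statement) =====
-- stated objective: alternative
-- what changed: Replaces the KeypadLoc class's per-character clamped (x,y) arithmetic and digit formula by a transition table: B derives a (direction, key) -> key dictionary once from the literal keypad layout ['123','456','789'] and then simulates each line by pure table lookups (unknown pairs default to staying put).
import Mathlib
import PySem

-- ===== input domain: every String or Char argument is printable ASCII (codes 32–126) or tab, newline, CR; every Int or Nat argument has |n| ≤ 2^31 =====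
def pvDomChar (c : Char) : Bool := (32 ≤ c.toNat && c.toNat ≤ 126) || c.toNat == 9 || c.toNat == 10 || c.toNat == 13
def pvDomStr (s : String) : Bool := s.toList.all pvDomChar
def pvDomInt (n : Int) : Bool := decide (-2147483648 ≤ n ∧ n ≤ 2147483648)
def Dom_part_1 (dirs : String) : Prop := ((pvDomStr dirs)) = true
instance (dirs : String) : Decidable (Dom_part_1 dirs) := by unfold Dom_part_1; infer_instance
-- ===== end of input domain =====

-- B replaces A's clamped (x,y) coordinate class and digit formula by a (direction, key) -> key
-- transition dictionary built once from the keypad layout (objective: alternative).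

-- ===== PORT A =====
-- KeypadLoc.move: loc is (x, y), each axis clamped to [-1, 1]
def pvMoveA (loc : Int × Int) (c : Char) : Int × Int :=
  if c = 'U' then (loc.1, max (-1) (loc.2 - 1))
  else if c = 'D' then (loc.1, min 1 (loc.2 + 1))
  else if c = 'L' then (max (-1) (loc.1 - 1), loc.2)
  else if c = 'R' then (min 1 (loc.1 + 1), loc.2)
  else loc

-- KeypadLoc.digit
def pvDigitA (loc : Int × Int) : String :=
  PySem.Int.toStr (3 * (loc.2 + 1) + loc.1 + 2)

def part_1 (dirs : String) : String :=
  ((PySem.Str.splitlines dirs).foldl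
    (fun st line =>
      let loc := line.toList.foldl pvMoveA st.1
      (loc, st.2 ++ pvDigitA loc))
    ((0, 0), "")).2

-- ===== PORT B =====
def pvPad : List String := ["123", "456", "789"]

-- pad[r][c] as a one-character string (indices produced by the build loop are always in range,
-- so the defaults of the two totality guards are never used)
def pvSq (r c : Int) : String :=
  match PySem.List.pyGet? pvPad r with
  | some row =>
    match PySem.Str.pyGet? row c with
    | some ch => String.ofList [ch]
    | none => ""
  | none => ""

-- the nested build loop of Source B
def pvTrans : PySem.Dict (Char × String) String :=
  (PySem.List.pyRange 0 3 1).foldl (fun d r =>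
    (PySem.List.pyRange 0 3 1).foldl (fun d c =>
      let k := pvSq r c
      let d := if r > 0 then d.insert ('U', k) (pvSq (r - 1) c) else d
      let d := if r < 2 then d.insert ('D', k) (pvSq (r + 1) c) else d
      let d := if c > 0 then d.insert ('L', k) (pvSq r (c - 1)) else d
      if c < 2 then d.insert ('R', k) (pvSq r (c + 1)) else d) d)
    PySem.Dict.empty

-- trans.get((ch, key), key)
def pvStepB (key : String) (ch : Char) : String :=
  PySem.Dict.getD pvTrans (ch, key) key

def part_1_alt (dirs : String) : String :=
  ((PySem.Str.splitlines dirs).foldl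
    (fun st line =>
      let key := line.toList.foldl pvStepB st.1
      (key, st.2 ++ key))
    ("5", "")).2

-- ===== PRECONDITION & SPEC =====
def Spec_part_1 (dirs : String) (out : String) : Prop := out = part_1_alt dirs
instance (dirs : String) (out : String) : Decidable (Spec_part_1 dirs out) := by unfold Spec_part_1; infer_instance

-- ===== CLAIM (what is proved, stated in full; the proofs are below) =====
def Claim_equal_part_1 : Prop := ∀ (dirs : String), Dom_part_1 dirs → Spec_part_1 dirs (part_1 dirs)

-- ===== LEMMAS AND PROOFS =====

-- the concrete value of the transition table
theorem pvTrans_eq : pvTrans = PySem.Dict.mk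
    [(('D', "1"), "4"), (('R', "1"), "2"), (('D', "2"), "5"), (('L', "2"), "1"), (('R', "2"), "3"),
     (('D', "3"), "6"), (('L', "3"), "2"), (('U', "4"), "1"), (('D', "4"), "7"), (('R', "4"), "5"),
     (('U', "5"), "2"), (('D', "5"), "8"), (('L', "5"), "4"), (('R', "5"), "6"), (('U', "6"), "3"),
     (('D', "6"), "9"), (('L', "6"), "5"), (('U', "7"), "4"), (('R', "7"), "8"), (('U', "8"), "5"),
     (('L', "8"), "7"), (('R', "8"), "9"), (('U', "9"), "6"), (('L', "9"), "8")] := by decide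

-- a character that is not a direction misses the table
theorem pvStepB_other (key : String) (c : Char)
    (hU : c ≠ 'U') (hD : c ≠ 'D') (hL : c ≠ 'L') (hR : c ≠ 'R') :
    pvStepB key c = key := by
  unfold pvStepB
  rw [PySem.Dict.getD_eq_get?_getD, pvTrans_eq]
  simp only [PySem.Dict.get?_mk_cons, beq_iff_eq, Prod.mk.injEq]
  simp [Ne.symm hU, Ne.symm hD, Ne.symm hL, Ne.symm hR, PySem.Dict.get?]

-- the coupling invariant between A's coordinates and B's key string
def pvRel (loc : Int × Int) (key : String) : Prop :=
  -1 ≤ loc.1 ∧ loc.1 ≤ 1 ∧ -1 ≤ loc.2 ∧ loc.2 ≤ 1 ∧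
  key = PySem.Int.toStr (3 * (loc.2 + 1) + loc.1 + 2)

theorem pvRel_step (loc : Int × Int) (key : String) (c : Char) (h : pvRel loc key) :
    pvRel (pvMoveA loc c) (pvStepB key c) := by
  obtain ⟨x, y⟩ := loc
  obtain ⟨h1, h2, h3, h4, h5⟩ := h
  simp only at h1 h2 h3 h4 h5
  subst h5
  by_cases hU : c = 'U'
  · subst hU; interval_cases x <;> interval_cases y <;> (simp only [pvRel]; decide)
  by_cases hD : c = 'D'
  · subst hD; interval_cases x <;> interval_cases y <;> (simp only [pvRel]; decide)
  by_cases hL : c = 'L'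
  · subst hL; interval_cases x <;> interval_cases y <;> (simp only [pvRel]; decide)
  by_cases hR : c = 'R'
  · subst hR; interval_cases x <;> interval_cases y <;> (simp only [pvRel]; decide)
  · rw [pvStepB_other _ _ hU hD hL hR]
    unfold pvMoveA pvRel
    simp [hU, hD, hL, hR]
    omega

theorem pvRel_foldl (cs : List Char) (loc : Int × Int) (key : String) (h : pvRel loc key) :
    pvRel (cs.foldl pvMoveA loc) (cs.foldl pvStepB key) := by
  induction cs generalizing loc key with
  | nil => exact h
  | cons c cs ih => exact ih _ _ (pvRel_step loc key c h)

theorem pvLines (lines : List String) (loc : Int × Int) (key : String) (code : String)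
    (h : pvRel loc key) :
    (lines.foldl (fun st line =>
        let l := line.toList.foldl pvMoveA st.1
        (l, st.2 ++ pvDigitA l)) (loc, code)).2
      = (lines.foldl (fun st line =>
        let k := line.toList.foldl pvStepB st.1
        (k, st.2 ++ k)) (key, code)).2 := by
  induction lines generalizing loc key code with
  | nil => rfl
  | cons line rest ih =>
    have h' := pvRel_foldl line.toList loc key h
    simp only [List.foldl]
    have hd : pvDigitA (line.toList.foldl pvMoveA loc) = line.toList.foldl pvStepB key := by
      unfold pvDigitA
      obtain ⟨_, _, _, _, h5⟩ := h'
      exact h5.symm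
    rw [hd]
    exact ih _ _ _ h'

-- ===== VERDICT (by name: the statement is the Claim_ definition above) =====
theorem part_1_spec : Claim_equal_part_1 := by
  intro dirs _
  unfold Spec_part_1 part_1 part_1_alt
  exact pvLines (PySem.Str.splitlines dirs) (0, 0) "5" ""
    ⟨by norm_num, by norm_num, by norm_num, by norm_num, by decide⟩
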